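-- pv_equiv track=rewrite | github.com/pypi-data/pypi-mirror-68 | packages/Contacts/Contacts-2.0b8-py3-none-any.whl/contacts/__init__.py | search
-- ===== SOURCE A (Python) =====
-- def search(args, contacts):
--     """Search the contacts."""
--     names = []
--     for name in contacts:
--         for arg in args:
--             if arg not in name and arg not in contacts[name]:
--                 break
--         else:
--             names.append(name)
--     return names
-- ===== SOURCE B (Python) =====
-- def search(args, contacts):
--     """Search the contacts."""
--     tally = {}
--     for arg in args:
--         for name, value in contacts.items():
--             if arg in name or arg in value:
--                 tally[name] = tally.get(name, 0) + 1
--     need = len(args)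
--     return [name for name in contacts if tally.get(name, 0) == need]
-- ===== Notes on version B (the rewrite author's own statement) =====
-- stated objective: alternative
-- what changed: Replaces the per-contact all-args scan with break/else by a tally: a counter dict of how many args match each contact is built with no short-circuiting, and a final threshold pass keeps the names whose count equals len(args).
import Mathlib
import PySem

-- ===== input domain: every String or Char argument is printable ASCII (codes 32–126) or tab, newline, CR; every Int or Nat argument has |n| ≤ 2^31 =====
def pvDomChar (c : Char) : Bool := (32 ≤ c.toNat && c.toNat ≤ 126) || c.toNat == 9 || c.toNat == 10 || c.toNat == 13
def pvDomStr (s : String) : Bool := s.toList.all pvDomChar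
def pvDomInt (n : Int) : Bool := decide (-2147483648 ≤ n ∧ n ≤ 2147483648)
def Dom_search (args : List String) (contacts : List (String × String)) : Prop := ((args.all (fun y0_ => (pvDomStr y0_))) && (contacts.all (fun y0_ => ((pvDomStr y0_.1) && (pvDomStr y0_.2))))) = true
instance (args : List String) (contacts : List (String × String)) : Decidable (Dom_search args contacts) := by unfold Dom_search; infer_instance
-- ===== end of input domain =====

-- B replaces A's per-contact all-args scan (break/else) by a match tally per contact and a final threshold pass — alternative decomposition, same cost.


-- ===== PORT A =====
def search (args : List String) (contacts : List (String × String)) : List String :=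
  let d := PySem.Dict.ofList contacts
  d.keys.foldl (fun names name =>
    if args.all (fun arg => PySem.Str.isIn arg name || PySem.Str.isIn arg (d.getD name "")) then
      names ++ [name]
    else
      names) []

-- ===== PORT B =====
def search_alt (args : List String) (contacts : List (String × String)) : List String :=
  let d := PySem.Dict.ofList contacts
  let tally := args.foldl (fun t arg =>
      d.items.foldl (fun t nv =>
        if PySem.Str.isIn arg nv.1 || PySem.Str.isIn arg nv.2 then
          t.insert nv.1 (t.getD nv.1 0 + 1)
        else t) t) (PySem.Dict.empty : PySem.Dict String Int)
  let need : Int := (args.length : Int)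
  d.keys.filter (fun name => tally.getD name 0 == need)

-- ===== PRECONDITION & SPEC =====
def Spec_search (args : List String) (contacts : List (String × String)) (out : List String) : Prop := out = search_alt args contacts
instance (args : List String) (contacts : List (String × String)) (out : List String) : Decidable (Spec_search args contacts out) := by unfold Spec_search; infer_instance

-- ===== CLAIM (what is proved, stated in full; the proofs are below) =====
def Claim_equal_search : Prop := ∀ (args : List String) (contacts : List (String × String)), Dom_search args contacts → Spec_search args contacts (search args contacts)

-- ===== LEMMAS AND PROOFS =====

-- a conditional-increment pass over keys not containing `name` leaves `name`'s tally untouched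
theorem tally_untouched (q : String → Bool) (name : String) :
    ∀ (keys : List String) (t : PySem.Dict String Int), name ∉ keys →
      (keys.foldl (fun t n => if q n then t.insert n (t.getD n 0 + 1) else t) t).getD name 0
        = t.getD name 0 := by
  intro keys
  induction keys with
  | nil => intro t _; rfl
  | cons k rest ih =>
      intro t hmem
      simp only [List.mem_cons, not_or] at hmem
      simp only [List.foldl_cons]
      rw [ih _ hmem.2]
      split_ifs with hq
      · rw [PySem.Dict.getD_insert_of_ne _ _ _ hmem.1]
      · rfl

-- one conditional-increment pass over nodup keys adds exactly (if q name then 1 else 0)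
theorem tally_pass (q : String → Bool) (name : String) :
    ∀ (keys : List String) (t : PySem.Dict String Int), keys.Nodup → name ∈ keys →
      (keys.foldl (fun t n => if q n then t.insert n (t.getD n 0 + 1) else t) t).getD name 0
        = t.getD name 0 + (if q name then 1 else 0) := by
  intro keys
  induction keys with
  | nil => intro t _ h; cases h
  | cons k rest ih =>
      intro t hnd hmem
      simp only [List.nodup_cons] at hnd
      simp only [List.foldl_cons]
      rcases List.mem_cons.mp hmem with heq | hrest
      · subst heq
        rw [tally_untouched q name rest _ hnd.1]
        split_ifs with hq
        · rw [PySem.Dict.getD_insert_self]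
        · simp
      · rw [ih _ hnd.2 hrest]
        congr 1
        split_ifs with hq
        · exact PySem.Dict.getD_insert_of_ne _ _ _ (fun h => hnd.1 (h ▸ hrest))
        · rfl

-- after the whole arg loop, `name`'s tally is the number of args matching `name`
theorem tally_count (p : String → String → Bool) (name : String) (keys : List String)
    (hnd : keys.Nodup) (hmem : name ∈ keys) :
    ∀ (args : List String) (t : PySem.Dict String Int),
      (args.foldl (fun t arg =>
          keys.foldl (fun t n => if p arg n then t.insert n (t.getD n 0 + 1) else t) t) t).getD name 0
        = t.getD name 0 + (args.countP (fun arg => p arg name) : Int) := by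
  intro args
  induction args with
  | nil => intro t; simp
  | cons a rest ih =>
      intro t
      simp only [List.foldl_cons]
      rw [ih, tally_pass (fun n => p a n) name keys _ hnd hmem, List.countP_cons]
      split_ifs with hq
      · push_cast; ring
      · push_cast; ring

-- `all p` as "the match count reaches the length", stated on the Bool/Int forms the two ports use
theorem all_eq_countP_beq {α : Type} (p : α → Bool) (l : List α) :
    l.all p = ((l.countP p : Int) == (l.length : Int)) := by
  by_cases h : ∀ a ∈ l, p a = true
  · rw [List.all_eq_true.mpr h, List.countP_eq_length.mpr h]
    simp
  · have h1 : l.all p = false := by simpa [List.all_eq_true] using h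
    have h2 : l.countP p ≠ l.length := fun hc => h (List.countP_eq_length.mp hc)
    rw [h1]
    symm
    rw [beq_eq_false_iff_ne]
    exact_mod_cast h2

-- ===== VERDICT (by name: the statement is the Claim_ definition above) =====
theorem search_spec : Claim_equal_search := by
  intro args contacts _
  unfold Spec_search search search_alt
  rw [PySem.List.foldl_append_if]
  simp only [List.nil_append, List.map_id',
    PySem.Dict.items_eq_map_keys (PySem.Dict.ofList contacts)
      (PySem.Dict.nodup_keys_ofList contacts) "",
    List.foldl_map]
  apply List.filter_congr
  intro name hmem
  rw [tally_count
        (fun arg n => PySem.Str.isIn arg n || PySem.Str.isIn arg ((PySem.Dict.ofList contacts).getD n ""))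
        name _ (PySem.Dict.nodup_keys_ofList contacts) hmem]
  simp only [PySem.Dict.getD_empty, zero_add]
  exact all_eq_countP_beq _ args
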